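-- pv_equiv track=rewrite | github.com/Sandeep165/PYTHON_M1 | Day_30/practice.py | even_odd_transform
-- ===== SOURCE A (Python) =====
-- def even_odd_transform(l1, n):
--
--     for j in range(n):
--         for i in range(0, len(l1)):
--             if l1[i] % 2 != 0:
--                 l1[i] = l1[i] + 2
--             else:
--                 l1[i] = l1[i] - 2
--
--     return l1
-- ===== SOURCE B (Python) =====
-- def even_odd_transform(l1, n):
--     # Closed form: n passes of (+2 if odd else -2) preserve parity, so
--     # each odd element gains 2n and each even element loses 2n (n<=0: no passes).
--     m = n if n > 0 else 0
--     for i in range(len(l1)):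
--         l1[i] = l1[i] + 2 * m if l1[i] % 2 != 0 else l1[i] - 2 * m
--     return l1
-- ===== Notes on version B (the rewrite author's own statement) =====
-- stated objective: faster
-- what changed: Replaces the n repeated passes over the list by a single pass using the parity invariant: each odd element gets +2n, each even element -2n.
import Mathlib
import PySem

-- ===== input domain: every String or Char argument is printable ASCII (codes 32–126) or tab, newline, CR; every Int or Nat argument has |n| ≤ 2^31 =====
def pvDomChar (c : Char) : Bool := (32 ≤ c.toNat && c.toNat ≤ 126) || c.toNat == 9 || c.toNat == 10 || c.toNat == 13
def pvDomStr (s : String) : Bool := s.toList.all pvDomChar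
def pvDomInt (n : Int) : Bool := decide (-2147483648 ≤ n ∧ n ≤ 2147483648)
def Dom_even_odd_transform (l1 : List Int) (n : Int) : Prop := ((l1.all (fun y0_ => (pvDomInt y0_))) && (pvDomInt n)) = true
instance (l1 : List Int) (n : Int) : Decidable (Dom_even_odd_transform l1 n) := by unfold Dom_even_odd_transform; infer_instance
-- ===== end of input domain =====

-- B changes the algorithm (one pass with +2n/-2n by parity instead of n passes of ±2);
-- A mutates l1 in place and B does the same in Python — the equivalence proved here is about the return value.

-- ===== PORT A =====
-- the inner 'for i in range(0, len(l1))' pass of A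
def pvPassA (l : List Int) : List Int :=
  (PySem.List.pyRange 0 (l.length : Int) 1).foldl
    (fun acc i =>
      if PySem.Int.mod (PySem.List.pyGetD acc i 0) 2 ≠ 0 then
        PySem.List.pySetD acc i (PySem.List.pyGetD acc i 0 + 2)
      else
        PySem.List.pySetD acc i (PySem.List.pyGetD acc i 0 - 2)) l

def even_odd_transform (l1 : List Int) (n : Int) : List Int :=
  (PySem.List.pyRange 0 n 1).foldl (fun acc _ => pvPassA acc) l1

-- ===== PORT B =====
def even_odd_transform_alt (l1 : List Int) (n : Int) : List Int :=
  let m : Int := if n > 0 then n else 0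
  l1.map (fun x => if PySem.Int.mod x 2 ≠ 0 then x + 2 * m else x - 2 * m)

-- ===== PRECONDITION & SPEC =====
def Spec_even_odd_transform (l1 : List Int) (n : Int) (out : List Int) : Prop := out = even_odd_transform_alt l1 n
instance (l1 : List Int) (n : Int) (out : List Int) : Decidable (Spec_even_odd_transform l1 n out) := by unfold Spec_even_odd_transform; infer_instance

-- ===== CLAIM (what is proved, stated in full; the proofs are below) =====
def Claim_equal_even_odd_transform : Prop := ∀ (l1 : List Int) (n : Int), Dom_even_odd_transform l1 n → Spec_even_odd_transform l1 n (even_odd_transform l1 n)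

-- ===== LEMMAS AND PROOFS =====

-- the single-pass update A applies to one element
def pvF (x : Int) : Int := if PySem.Int.mod x 2 ≠ 0 then x + 2 else x - 2
-- B's per-element map after m passes
def pvG (m : Int) (x : Int) : Int := if PySem.Int.mod x 2 ≠ 0 then x + 2 * m else x - 2 * m

theorem pvMod2 (x : Int) : PySem.Int.mod x 2 = x % 2 :=
  PySem.Int.mod_eq_emod_of_pos (by omega)

theorem pvF_G (m x : Int) : pvF (pvG m x) = pvG (m + 1) x := by
  unfold pvF pvG
  simp only [pvMod2]
  split_ifs <;> omega

theorem pvG_zero (x : Int) : pvG 0 x = x := by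
  unfold pvG; split <;> ring

theorem pvMapG_zero (l : List Int) : l.map (pvG 0) = l := by
  rw [funext pvG_zero]
  exact List.map_id' l

-- A's index pass computes a map of pvF: loop invariant over the prefix
theorem pvPass_prefix (l : List Int) (k : Nat) (hk : k ≤ l.length) :
    (PySem.List.pyRange 0 (k : Int) 1).foldl
      (fun acc i =>
        if PySem.Int.mod (PySem.List.pyGetD acc i 0) 2 ≠ 0 then
          PySem.List.pySetD acc i (PySem.List.pyGetD acc i 0 + 2)
        else
          PySem.List.pySetD acc i (PySem.List.pyGetD acc i 0 - 2)) l
      = (l.take k).map pvF ++ l.drop k := by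
  induction k with
  | zero => simp [PySem.List.pyRange]
  | succ k ih =>
    have hk' : k ≤ l.length := by omega
    have hlt : k < l.length := by omega
    have hr : PySem.List.pyRange 0 ((k : Int) + 1) 1
        = PySem.List.pyRange 0 (k : Int) 1 ++ [(k : Int)] := by
      simpa using PySem.List.pyRange_one_succ_right (a := 0) (b := (k : Int)) (by omega)
    have hcast : ((k + 1 : Nat) : Int) = (k : Int) + 1 := by push_cast; ring
    rw [hcast, hr, List.foldl_append, ih hk']
    have hget : PySem.List.pyGetD ((l.take k).map pvF ++ l.drop k) (k : Int) 0 = l[k] := by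
      rw [PySem.List.pyGetD_natCast]
      have hlen : ((l.take k).map pvF).length = k := by simp [hk']
      rw [List.getD_eq_getElem?_getD, List.getElem?_append_right (by omega)]
      simp [Nat.min_eq_left hk', List.getElem?_eq_getElem hlt]
    have hset : ∀ v : Int, PySem.List.pySetD ((l.take k).map pvF ++ l.drop k) (k : Int) v
        = (l.take k).map pvF ++ v :: l.drop (k + 1) := by
      intro v
      rw [PySem.List.pySetD_natCast]
      have hlen : ((l.take k).map pvF).length = k := by simp [hk']
      rw [List.set_append_right _ _ (by omega)]
      have h0 : k - ((l.take k).map pvF).length = 0 := by omega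
      rw [h0, List.drop_eq_getElem_cons hlt, List.set_cons_zero]
    simp only [List.foldl_cons, List.foldl_nil, hget]
    have ht : l.take (k + 1) = l.take k ++ [l[k]] := by
      rw [List.take_add_one, List.getElem?_eq_getElem hlt]
      rfl
    by_cases h : PySem.Int.mod l[k] 2 ≠ 0
    · rw [if_pos h, hset, ht, List.map_append]
      simp only [pvF, List.map_cons, List.map_nil, if_pos h, List.cons_append,
        List.nil_append, List.append_assoc]
    · rw [if_neg h, hset, ht, List.map_append]
      simp only [pvF, List.map_cons, List.map_nil, if_neg h, List.cons_append,
        List.nil_append, List.append_assoc]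

theorem pvPass_eq (l : List Int) : pvPassA l = l.map pvF := by
  unfold pvPassA
  simpa using pvPass_prefix l l.length (le_refl _)

theorem pvRange_neg (n : Int) (hn : n ≤ 0) : PySem.List.pyRange 0 n 1 = [] := by
  simp [PySem.List.pyRange]
  omega

-- t iterations of the pass = one map of pvG t
theorem pvIter (l : List Int) (t : Nat) :
    (PySem.List.pyRange 0 (t : Int) 1).foldl (fun acc _ => pvPassA acc) l
      = l.map (pvG (t : Int)) := by
  induction t with
  | zero =>
    simp only [Int.natCast_zero]
    rw [pvRange_neg 0 (by omega), List.foldl_nil, pvMapG_zero]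
  | succ t ih =>
    have hr : PySem.List.pyRange 0 ((t : Int) + 1) 1
        = PySem.List.pyRange 0 (t : Int) 1 ++ [(t : Int)] := by
      simpa using PySem.List.pyRange_one_succ_right (a := 0) (b := (t : Int)) (by omega)
    have hcast : ((t + 1 : Nat) : Int) = (t : Int) + 1 := by push_cast; ring
    rw [hcast, hr, List.foldl_append, ih]
    simp only [List.foldl_cons, List.foldl_nil, pvPass_eq, List.map_map]
    exact List.map_congr_left (fun x _ => by simpa [Function.comp] using pvF_G (t : Int) x)

-- ===== VERDICT (by name: the statement is the Claim_ definition above) =====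
theorem even_odd_transform_spec : Claim_equal_even_odd_transform := by
  intro l1 n _
  unfold Spec_even_odd_transform even_odd_transform even_odd_transform_alt
  by_cases hn : n > 0
  · have ht : n = ((n.toNat : Nat) : Int) := by omega
    rw [ht, pvIter]
    simp only [if_pos (by omega : ((n.toNat : Nat) : Int) > 0)]
    rfl
  · rw [pvRange_neg n (by omega)]
    simp only [List.foldl_nil, if_neg hn]
    simp only [mul_zero, add_zero, sub_zero, ite_self, List.map_id']
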